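-- pv_equiv track=rewrite | github.com/mike006322/ProjectEuler | Solutions/PE053_combinatoric_selections/combinatoric_selections.py | combinatoric_selections
-- ===== SOURCE A (Python) =====
-- from math import prod
--
-- def n_choose_r(n: int, r: int):
--     return prod(range(r + 1, n + 1)) // prod(range(1, n - r + 1))
--
-- def combinatoric_selections(N: int, K: int):
--     total_combos = 0
--     for n in range(1, N + 1):
--         # use symmetry: nCr = nC(n-r)
--         has_some_above_K = False
--         r = 1
--         while r <= n//2:
--             if n_choose_r(n, r) > K:
--                 has_some_above_K = True
--                 break
--             r += 1
--         if has_some_above_K: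
--             if n % 2 == 0:
--                 total_combos += n - 2*(r-1) - 1
--             else:
--                 total_combos += 2*(n//2 - (r - 1))
--     return total_combos
-- ===== SOURCE B (Python) =====
-- def combinatoric_selections(N, K):
--     # Incrementally maintain c = C(n, r) via c = c*(n-r+1)//r (exact), O(N^2) instead of A's O(N^3);
--     # the first r with C(n,r) > K contributes n - 2*r + 1 values by symmetry (same for even and odd n).
--     total = 0
--     for n in range(1, N + 1):
--         c = 1
--         r = 0
--         while r < n // 2:
--             r += 1
--             c = c * (n - r + 1) // r
--             if c > K:
--                 total += n - 2 * r + 1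
--                 break
--     return total
-- ===== Notes on version B (the rewrite author's own statement) =====
-- stated objective: faster
-- what changed: B maintains C(n,r) incrementally via c = c*(n-r+1)//r inside a single scan (and uses the unified count n-2r+1 for both parities) instead of A's recomputing two full products for every (n,r).
import Mathlib
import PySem

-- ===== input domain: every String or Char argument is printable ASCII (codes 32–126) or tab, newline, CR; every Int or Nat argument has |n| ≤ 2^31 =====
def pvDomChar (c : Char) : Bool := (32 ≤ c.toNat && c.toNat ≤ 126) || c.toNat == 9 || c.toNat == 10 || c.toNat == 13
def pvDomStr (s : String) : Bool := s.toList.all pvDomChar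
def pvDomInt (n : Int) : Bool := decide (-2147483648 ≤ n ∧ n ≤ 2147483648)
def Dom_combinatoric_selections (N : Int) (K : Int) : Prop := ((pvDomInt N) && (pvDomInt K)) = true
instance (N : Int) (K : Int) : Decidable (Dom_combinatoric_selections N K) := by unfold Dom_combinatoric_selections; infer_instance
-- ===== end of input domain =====

-- B replaces A's per-r recomputation of C(n,r) from two range products by the incremental
-- update c = c*(n-r+1)//r in a single scan, and adds the unified count n-2r+1 for both parities.

-- ===== PORT A =====
-- math.prod of a list of ints
def pvProd (l : List Int) : Int := l.foldl (· * ·) 1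

-- prod(range(r+1, n+1)) // prod(range(1, n-r+1)); the divisor is a product of a range
-- starting at 1, hence never 0, so Python's '//' never raises and A is total.
def n_choose_r (n : Int) (r : Int) : Int :=
  PySem.Int.floordiv (pvProd (PySem.List.pyRange (r + 1) (n + 1) 1))
                     (pvProd (PySem.List.pyRange 1 (n - r + 1) 1))

-- the 'while r <= n//2' loop of A: returns (has_some_above_K, r) at exit;
-- fuel = number of remaining admissible values of r, a pure totality guard
def aLoop (K : Int) (n : Int) : Nat → Int → Bool × Int
  | 0, r => (false, r)
  | fuel + 1, r =>
    if r ≤ PySem.Int.floordiv n 2 then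
      if n_choose_r n r > K then (true, r)
      else aLoop K n fuel (r + 1)
    else (false, r)

def combinatoric_selections (N : Int) (K : Int) : Int :=
  (PySem.List.pyRange 1 (N + 1) 1).foldl (fun total_combos n =>
    let p := aLoop K n (PySem.Int.floordiv n 2).toNat 1
    if p.1 then
      if PySem.Int.mod n 2 = 0 then total_combos + (n - 2 * (p.2 - 1) - 1)
      else total_combos + 2 * (PySem.Int.floordiv n 2 - (p.2 - 1))
    else total_combos) 0

-- ===== PORT B =====
-- Source B's 'while r < n//2' loop: carries the running total and c = C(n,r)
def bLoop (K : Int) (n : Int) : Nat → Int → Int → Int → Int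
  | 0, total, _, _ => total
  | fuel + 1, total, r, c =>
    if r < PySem.Int.floordiv n 2 then
      let r' := r + 1
      let c' := PySem.Int.floordiv (c * (n - r' + 1)) r'
      if c' > K then total + (n - 2 * r' + 1)
      else bLoop K n fuel total r' c'
    else total

def combinatoric_selections_alt (N : Int) (K : Int) : Int :=
  (PySem.List.pyRange 1 (N + 1) 1).foldl (fun total n =>
    bLoop K n (PySem.Int.floordiv n 2).toNat total 0 1) 0

-- ===== PRECONDITION & SPEC =====
def Spec_combinatoric_selections (N : Int) (K : Int) (out : Int) : Prop := out = combinatoric_selections_alt N K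
instance (N : Int) (K : Int) (out : Int) : Decidable (Spec_combinatoric_selections N K out) := by unfold Spec_combinatoric_selections; infer_instance

-- ===== CLAIM (what is proved, stated in full; the proofs are below) =====
def Claim_equal_combinatoric_selections : Prop := ∀ (N : Int) (K : Int), Dom_combinatoric_selections N K → Spec_combinatoric_selections N K (combinatoric_selections N K)

-- ===== LEMMAS AND PROOFS =====

lemma pvProd_append_singleton (l : List Int) (x : Int) :
    pvProd (l ++ [x]) = pvProd l * x := by
  simp [pvProd, List.foldl_append]

-- a! * ((a+1) * (a+2) * … * (a+m)) = (a+m)!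
lemma prod_pyRange_fact (a : Int) (ha : 0 ≤ a) (m : Nat) :
    (a.toNat.factorial : Int) * pvProd (PySem.List.pyRange (a + 1) (a + 1 + m) 1)
      = ((a.toNat + m).factorial : Int) := by
  induction m with
  | zero =>
    have h0 : a + 1 + ((0 : Nat) : Int) = a + 1 := by push_cast; ring
    rw [h0, PySem.List.pyRange_one_eq_nil (le_refl (a + 1))]
    simp [pvProd]
  | succ m ih =>
    have hcast : a + 1 + ((m + 1 : Nat) : Int) = (a + 1 + (m : Int)) + 1 := by
      push_cast; ring
    rw [hcast, PySem.List.pyRange_one_succ_right (by omega : a + 1 ≤ a + 1 + (m : Int)),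
      pvProd_append_singleton, ← mul_assoc, ih,
      (by omega : a.toNat + (m + 1) = (a.toNat + m) + 1), Nat.factorial_succ]
    push_cast
    have : a + 1 + (m : Int) = ((a.toNat + m : Nat) : Int) + 1 := by push_cast; omega
    rw [this]
    push_cast
    ring

lemma choose_eval (n r : Int) (h1 : 1 ≤ r) (h2 : 2 * r ≤ n) :
    n_choose_r n r = (n.toNat.choose r.toNat : Int) := by
  have hr0 : 0 ≤ r := by omega
  have hnum : (r.toNat.factorial : Int) * pvProd (PySem.List.pyRange (r + 1) (n + 1) 1)
      = (n.toNat.factorial : Int) := by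
    have h := prod_pyRange_fact r hr0 (n - r).toNat
    rw [(by omega : r + 1 + ((n - r).toNat : Int) = n + 1),
      (by omega : r.toNat + (n - r).toNat = n.toNat)] at h
    exact h
  have hden : pvProd (PySem.List.pyRange 1 (n - r + 1) 1) = ((n - r).toNat.factorial : Int) := by
    have h := prod_pyRange_fact 0 le_rfl (n - r).toNat
    rw [(by omega : (0 : Int) + 1 + ((n - r).toNat : Int) = n - r + 1)] at h
    norm_num at h
    exact h
  have hc := Nat.choose_mul_factorial_mul_factorial (n := n.toNat) (k := r.toNat) (by omega)
  rw [(by omega : n.toNat - r.toNat = (n - r).toNat)] at hc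
  have hnum' : pvProd (PySem.List.pyRange (r + 1) (n + 1) 1)
      = (n.toNat.choose r.toNat : Int) * ((n - r).toNat.factorial : Int) := by
    have hfp : (0 : Int) < (r.toNat.factorial : Int) := by exact_mod_cast r.toNat.factorial_pos
    refine mul_left_cancel₀ (by omega : (r.toNat.factorial : Int) ≠ 0) ?_
    rw [hnum, ← hc]; push_cast; ring
  have hdpos : (0 : Int) < ((n - r).toNat.factorial : Int) := by
    exact_mod_cast (n - r).toNat.factorial_pos
  rw [n_choose_r, hnum', hden, PySem.Int.floordiv_eq_ediv_of_pos hdpos,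
    Int.mul_ediv_cancel _ (by omega)]

lemma choose_step (n r : Int) (h1 : 1 ≤ r) (h2 : 2 * r ≤ n) :
    PySem.Int.floordiv ((n.toNat.choose (r - 1).toNat : Int) * (n - r + 1)) r
      = (n.toNat.choose r.toNat : Int) := by
  have hc := Nat.choose_succ_right_eq n.toNat (r - 1).toNat
  have e3 : n - r + 1 = ((n.toNat - (r - 1).toNat : Nat) : Int) := by
    rw [Nat.cast_sub (by omega)]; omega
  have key : (n.toNat.choose (r - 1).toNat : Int) * (n - r + 1)
      = (n.toNat.choose r.toNat : Int) * r := by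
    rw [e3, ← Nat.cast_mul, ← hc, (by omega : (r - 1).toNat + 1 = r.toNat), Nat.cast_mul]
    have : ((r.toNat : Nat) : Int) = r := by omega
    rw [this]
  rw [key, PySem.Int.floordiv_eq_ediv_of_pos (by omega : (0 : Int) < r),
    Int.mul_ediv_cancel _ (by omega)]

-- the two inner loops agree, including A's parity-split contribution formula
lemma loop_agree (K n : Int) :
    ∀ (fuel : Nat) (r total : Int), 1 ≤ r →
      r + fuel = PySem.Int.floordiv n 2 + 1 →
      bLoop K n fuel total (r - 1) ((n.toNat.choose (r - 1).toNat : Int))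
        = (let p := aLoop K n fuel r;
           if p.1 then
             if PySem.Int.mod n 2 = 0 then total + (n - 2 * (p.2 - 1) - 1)
             else total + 2 * (PySem.Int.floordiv n 2 - (p.2 - 1))
           else total) := by
  have hfd : PySem.Int.floordiv n 2 = n / 2 :=
    PySem.Int.floordiv_eq_ediv_of_pos (by omega)
  have h5 := PySem.Int.floordiv_mul_add_mod n 2
  have h6 : 0 ≤ PySem.Int.mod n 2 := PySem.Int.mod_nonneg n (by omega)
  have h7 : PySem.Int.mod n 2 < 2 := PySem.Int.mod_lt n (by omega)
  intro fuel
  induction fuel with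
  | zero =>
    intro r total h1 h2
    simp [bLoop, aLoop]
  | succ fuel ih =>
    intro r total h1 h2
    have hrh : r ≤ PySem.Int.floordiv n 2 := by omega
    have h2r : 2 * r ≤ n := by omega
    simp only [bLoop, aLoop, if_pos (show r - 1 < PySem.Int.floordiv n 2 by omega), if_pos hrh]
    have hr1 : r - 1 + 1 = r := by ring
    simp only [hr1]
    rw [choose_step n r h1 h2r, ← choose_eval n r h1 h2r]
    by_cases hK : n_choose_r n r > K
    · simp only [if_pos hK]
      by_cases hp : PySem.Int.mod n 2 = 0
      · simp only [if_pos hp, if_pos trivial]; omega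
      · simp only [if_neg hp, if_pos trivial]; omega
    · simp only [if_neg hK]
      rw [choose_eval n r h1 h2r]
      have := ih (r + 1) total (by omega) (by omega)
      rw [(by ring : r + 1 - 1 = r)] at this
      exact this

-- ===== VERDICT (by name: the statement is the Claim_ definition above) =====
theorem combinatoric_selections_spec : Claim_equal_combinatoric_selections := by
  intro N K _
  unfold Spec_combinatoric_selections combinatoric_selections combinatoric_selections_alt
  apply PySem.List.foldl_congr_mem
  intro acc n hmem
  have hn : 1 ≤ n := ((PySem.List.mem_pyRange_one).1 hmem).1
  have hfd0 : 0 ≤ PySem.Int.floordiv n 2 := by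
    rw [PySem.Int.floordiv_eq_ediv_of_pos (by omega : (0 : Int) < 2)]; omega
  have h := loop_agree K n (PySem.Int.floordiv n 2).toNat 1 acc le_rfl (by omega)
  rw [(by ring : (1 : Int) - 1 = 0)] at h
  simp only [Int.toNat_zero, Nat.choose_zero_right, Nat.cast_one] at h
  exact h.symm
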